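-- pv_equiv track=rewrite | github.com/filming/Practice | Competitions/AOC_2023/Day_1/problem_2.py | find_calibration_value
-- ===== SOURCE A (Python) =====
-- text_to_digit_map = {
--     "one":1,
--     "two":2,
--     "three":3,
--     "four":4,
--     "five":5,
--     "six":6,
--     "seven":7,
--     "eight":8,
--     "nine":9
-- }
--
-- def find_calibration_value(calibration_string):
--     # convert input string into a string only containing digits
--     calibration_digits = ""
--
--     curr_index = 0
--     while curr_index < len(calibration_string):
--         if calibration_string[curr_index] in ('o', 't', 'f', 's', 'e', 'n'):
--
--             if calibration_string[curr_index] == 'o':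
--                 if calibration_string[curr_index: curr_index+3] in text_to_digit_map: # possibly creating a substr of "one"
--                     calibration_digits += '1'
--                     curr_index += 2
--
--                 else:
--                     curr_index += 1
--
--             elif calibration_string[curr_index] == 't':
--                 if calibration_string[curr_index: curr_index+3] in text_to_digit_map: # possibly creating a substr of "two"
--                     calibration_digits += '2'
--                     curr_index += 2
--
--                 elif calibration_string[curr_index: curr_index+5] in text_to_digit_map: # possibly creating a substr of "three"
--                     calibration_digits += '3'
--                     curr_index += 4
--
--                 else:
--                     curr_index += 1
--
--             elif calibration_string[curr_index] == 'f':
--                 substr = calibration_string[curr_index: curr_index+4] # possibly creating a substr of "four" or "five"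
--
--                 if substr in text_to_digit_map:
--                     if substr == "four":
--                         calibration_digits += '4'
--                     else:
--                         calibration_digits += '5'
--
--                     curr_index += 3
--
--                 else:
--                     curr_index += 1
--
--             elif calibration_string[curr_index] == 's':
--                 if calibration_string[curr_index: curr_index+3] in text_to_digit_map: # possibly creating a substr of "six"
--                     calibration_digits += '6'
--                     curr_index += 2
--
--                 elif calibration_string[curr_index: curr_index+5] in text_to_digit_map: # possibly creating a substr of "seven"
--                     calibration_digits += '7'
--                     curr_index += 4
--
--                 else:
--                     curr_index += 1
--
--             elif calibration_string[curr_index] == 'e':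
--                 if calibration_string[curr_index: curr_index+5] in text_to_digit_map: # possibly creating a substr of "eight"
--                     calibration_digits += '8'
--                     curr_index += 4
--
--                 else:
--                     curr_index += 1
--
--             else:
--                 if calibration_string[curr_index: curr_index+4] in text_to_digit_map: # possibly creating a substr of "nine"
--                     calibration_digits += '9'
--                     curr_index += 3
--
--                 else:
--                     curr_index += 1
--
--         elif calibration_string[curr_index].isnumeric():
--             calibration_digits += calibration_string[curr_index]
--             curr_index += 1
--
--         else:
--             curr_index += 1
--
--     # return the first and last digit of the newly transcribed string
--     first_digit, last_digit = calibration_digits[0], calibration_digits[len(calibration_digits) - 1]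
--
--     return int(first_digit + last_digit)
-- ===== SOURCE B (Python) =====
-- _WORD_TO_CHAR = {
--     "one": "1", "two": "2", "three": "3", "four": "4", "five": "5",
--     "six": "6", "seven": "7", "eight": "8", "nine": "9",
-- }
--
-- def find_calibration_value(calibration_string):
--     def digit_at(i):
--         c = calibration_string[i]
--         if c.isdigit():
--             return c
--         for word, d in _WORD_TO_CHAR.items():
--             if calibration_string.startswith(word, i):
--                 return d
--         return None
--
--     n = len(calibration_string)
--     first_digit = None
--     for i in range(n):
--         first_digit = digit_at(i)
--         if first_digit is not None:
--             break
--     last_digit = None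
--     for i in range(n - 1, -1, -1):
--         last_digit = digit_at(i)
--         if last_digit is not None:
--             break
--     return int(first_digit + last_digit)
-- ===== Notes on version B (the rewrite author's own statement) =====
-- stated objective: alternative
-- what changed: A makes one skip-ahead pass transcribing every digit token into a string and then indexes its ends; B never builds that string: it finds the first digit token by an early-exit left-to-right scan and the last one by an independent right-to-left scan of start positions.
import Mathlib
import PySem

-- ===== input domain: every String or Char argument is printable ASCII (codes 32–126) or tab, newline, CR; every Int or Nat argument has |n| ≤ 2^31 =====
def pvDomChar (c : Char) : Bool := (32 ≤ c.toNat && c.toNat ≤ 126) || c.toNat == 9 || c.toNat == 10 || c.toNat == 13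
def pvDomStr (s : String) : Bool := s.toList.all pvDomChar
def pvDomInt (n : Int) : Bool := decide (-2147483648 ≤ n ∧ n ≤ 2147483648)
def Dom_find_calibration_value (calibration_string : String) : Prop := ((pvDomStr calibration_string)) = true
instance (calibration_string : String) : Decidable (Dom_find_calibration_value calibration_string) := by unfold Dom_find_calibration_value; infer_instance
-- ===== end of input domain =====

-- B replaces A's single skip-ahead transcription pass by two independent early-exit scans
-- (left-to-right for the first digit token, right-to-left for the last). Same return value on Pre_.

-- ===== PORT A =====
-- keys of text_to_digit_map (membership 'slice in text_to_digit_map' is key membership)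
def pvAKeys : List (List Char) :=
  [['o','n','e'],['t','w','o'],['t','h','r','e','e'],['f','o','u','r'],['f','i','v','e'],
   ['s','i','x'],['s','e','v','e','n'],['e','i','g','h','t'],['n','i','n','e']]
def pvAInMap (w : List Char) : Bool := pvAKeys.any (fun k => k == w)

-- A's while loop over curr_index, transliterated as recursion on the remaining suffix
-- (s[curr_index] = head, s[curr_index:curr_index+k] = take k, curr_index += k = drop k;
--  c.isnumeric() is ported as PySem.Chars.isdigit, exact on the ASCII domain Dom_).
def pvAScan : List Char → List Char
  | [] => []
  | c :: rest =>
    if c = 'o' ∨ c = 't' ∨ c = 'f' ∨ c = 's' ∨ c = 'e' ∨ c = 'n' then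
      if c = 'o' then
        if pvAInMap ((c :: rest).take 3) then '1' :: pvAScan (rest.drop 1)
        else pvAScan rest
      else if c = 't' then
        if pvAInMap ((c :: rest).take 3) then '2' :: pvAScan (rest.drop 1)
        else if pvAInMap ((c :: rest).take 5) then '3' :: pvAScan (rest.drop 3)
        else pvAScan rest
      else if c = 'f' then
        let substr := (c :: rest).take 4
        if pvAInMap substr then
          (if substr = ['f','o','u','r'] then '4' else '5') :: pvAScan (rest.drop 2)
        else pvAScan rest
      else if c = 's' then
        if pvAInMap ((c :: rest).take 3) then '6' :: pvAScan (rest.drop 1)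
        else if pvAInMap ((c :: rest).take 5) then '7' :: pvAScan (rest.drop 3)
        else pvAScan rest
      else if c = 'e' then
        if pvAInMap ((c :: rest).take 5) then '8' :: pvAScan (rest.drop 3)
        else pvAScan rest
      else
        if pvAInMap ((c :: rest).take 4) then '9' :: pvAScan (rest.drop 2)
        else pvAScan rest
    else if PySem.Chars.isdigit c then c :: pvAScan rest
    else pvAScan rest
termination_by u => u.length
decreasing_by all_goals simp [List.length_drop]

def find_calibration_value (calibration_string : String) : Int :=
  let calibration_digits := pvAScan calibration_string.toList
  -- calibration_digits[0] / calibration_digits[len-1] raise IndexError when empty: excluded by Pre_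
  match PySem.List.pyGet? calibration_digits 0,
        PySem.List.pyGet? calibration_digits ((calibration_digits.length : Int) - 1) with
  | some first_digit, some last_digit => (PySem.Int.ofChars? [first_digit, last_digit]).getD 0
  | _, _ => 0

-- ===== PORT B =====
def pvWordMap : List (List Char × Char) :=
  [(['o','n','e'],'1'),(['t','w','o'],'2'),(['t','h','r','e','e'],'3'),(['f','o','u','r'],'4'),
   (['f','i','v','e'],'5'),(['s','i','x'],'6'),(['s','e','v','e','n'],'7'),
   (['e','i','g','h','t'],'8'),(['n','i','n','e'],'9')]

-- digit_at(i) over the suffix s[i:]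
def pvDigitAt : List Char → Option Char
  | [] => none
  | c :: rest =>
    if PySem.Chars.isdigit c then some c
    else (pvWordMap.find? (fun p => PySem.Chars.startswith (c :: rest) p.1)).map (·.2)

-- for i in range(n): first hit of digit_at
def pvFirstScan : List Char → Option Char
  | [] => none
  | c :: rest =>
    match pvDigitAt (c :: rest) with
    | some d => some d
    | none => pvFirstScan rest

-- for i in range(n-1,-1,-1): first hit scanning from the right
def pvLastScan : List Char → Option Char
  | [] => none
  | c :: rest =>
    match pvLastScan rest with
    | some d => some d
    | none => pvDigitAt (c :: rest)

def find_calibration_value_alt (calibration_string : String) : Int :=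
  match pvFirstScan calibration_string.toList with
  | none => 0
  | some first_digit =>
    match pvLastScan calibration_string.toList with
    | none => 0
    | some last_digit => (PySem.Int.ofChars? [first_digit, last_digit]).getD 0

-- ===== PRECONDITION & SPEC =====
-- Pre_'s own copy of the spelled-digit words (Pre_ may not reach the ports)
def pvPreWords : List String :=
  ["one", "two", "three", "four", "five", "six", "seven", "eight", "nine"]
def pvHasTok : List Char → Bool
  | [] => false
  | c :: rest =>
    (PySem.Chars.isdigit c || pvPreWords.any (fun w => w.toList.isPrefixOf (c :: rest))) || pvHasTok rest

-- Pre_ excludes exactly the strings containing no digit character and no spelled digit word: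
-- there A indexes the empty transcription string and raises IndexError (B raises too).
def Pre_find_calibration_value (calibration_string : String) : Prop :=
  pvHasTok calibration_string.toList = true
instance (calibration_string : String) : Decidable (Pre_find_calibration_value calibration_string) := by
  unfold Pre_find_calibration_value; infer_instance

def pvWitness_find_calibration_value : String := "xtwone3x"

def Spec_find_calibration_value (calibration_string : String) (out : Int) : Prop := out = find_calibration_value_alt calibration_string
instance (calibration_string : String) (out : Int) : Decidable (Spec_find_calibration_value calibration_string out) := by unfold Spec_find_calibration_value; infer_instance

-- ===== CLAIM (what is proved, stated in full; the proofs are below) =====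
def Claim_equal_find_calibration_value : Prop := ∀ (calibration_string : String), Dom_find_calibration_value calibration_string → Pre_find_calibration_value calibration_string → Spec_find_calibration_value calibration_string (find_calibration_value calibration_string)

-- ===== LEMMAS AND PROOFS =====

-- the per-index token list; B's two scans read its head?/getLast?, A's skip scan produces a
-- sublist with the same head?/getLast?
def pvToks : List Char → List Char
  | [] => []
  | c :: rest => (pvDigitAt (c :: rest)).toList ++ pvToks rest

lemma pvFirstScan_eq_head (u : List Char) : pvFirstScan u = (pvToks u).head? := by
  induction u with
  | nil => rfl
  | cons c rest ih =>
    simp only [pvFirstScan, pvToks]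
    cases pvDigitAt (c :: rest) <;> simp [ih]

lemma pvLastScan_eq_getLast (u : List Char) : pvLastScan u = (pvToks u).getLast? := by
  induction u with
  | nil => rfl
  | cons c rest ih =>
    simp only [pvLastScan, pvToks, ih]
    cases h : (pvToks rest).getLast? with
    | some d =>
      rcases List.getLast?_eq_some_iff.mp h with ⟨ys, hy⟩
      cases pvDigitAt (c :: rest) with
      | none => simp [hy, List.getLast?_append]
      | some v =>
        rw [hy, Option.toList_some, List.singleton_append, ← List.cons_append,
          List.getLast?_concat]
    | none =>
      have : pvToks rest = [] := by
        cases hr : pvToks rest with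
        | nil => rfl
        | cons x xs => rw [hr] at h; simp at h
      rw [this]
      cases pvDigitAt (c :: rest) <;> simp

lemma pv_cons_getLast {X Y : List Char} (d : Char) (h : X.getLast? = Y.getLast?) :
    (d :: X).getLast? = (d :: Y).getLast? := by
  simp [List.getLast?_cons, h]


-- -- membership of A's dict slices, characterised by the shape of the suffix --
lemma pvIn_o3 (rest : List Char) :
    pvAInMap (('o'::rest).take 3) = true ↔ ∃ t, rest = 'n'::'e'::t := by
  rcases rest with _|⟨a,_|⟨b,r⟩⟩ <;> simp [pvAInMap, pvAKeys] <;> aesop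
lemma pvIn_t3 (rest : List Char) :
    pvAInMap (('t'::rest).take 3) = true ↔ ∃ t, rest = 'w'::'o'::t := by
  rcases rest with _|⟨a,_|⟨b,r⟩⟩ <;> simp [pvAInMap, pvAKeys] <;> aesop
lemma pvIn_t5 (rest : List Char) :
    pvAInMap (('t'::rest).take 5) = true ↔ (∃ t, rest = 'h'::'r'::'e'::'e'::t) ∨ rest = ['w','o'] := by
  rcases rest with _|⟨a,_|⟨b,_|⟨c,_|⟨d,r⟩⟩⟩⟩ <;> simp [pvAInMap, pvAKeys] <;> aesop
lemma pvIn_f4 (rest : List Char) :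
    pvAInMap (('f'::rest).take 4) = true ↔
      (∃ t, rest = 'o'::'u'::'r'::t) ∨ (∃ t, rest = 'i'::'v'::'e'::t) := by
  rcases rest with _|⟨a,_|⟨b,_|⟨c,r⟩⟩⟩ <;> simp [pvAInMap, pvAKeys] <;> aesop
lemma pvIn_s3 (rest : List Char) :
    pvAInMap (('s'::rest).take 3) = true ↔ ∃ t, rest = 'i'::'x'::t := by
  rcases rest with _|⟨a,_|⟨b,r⟩⟩ <;> simp [pvAInMap, pvAKeys] <;> aesop
lemma pvIn_s5 (rest : List Char) :
    pvAInMap (('s'::rest).take 5) = true ↔ (∃ t, rest = 'e'::'v'::'e'::'n'::t) ∨ rest = ['i','x'] := by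
  rcases rest with _|⟨a,_|⟨b,_|⟨c,_|⟨d,r⟩⟩⟩⟩ <;> simp [pvAInMap, pvAKeys] <;> aesop
lemma pvIn_e5 (rest : List Char) :
    pvAInMap (('e'::rest).take 5) = true ↔ ∃ t, rest = 'i'::'g'::'h'::'t'::t := by
  rcases rest with _|⟨a,_|⟨b,_|⟨c,_|⟨d,r⟩⟩⟩⟩ <;> simp [pvAInMap, pvAKeys] <;> aesop
lemma pvIn_n4 (rest : List Char) :
    pvAInMap (('n'::rest).take 4) = true ↔ ∃ t, rest = 'i'::'n'::'e'::t := by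
  rcases rest with _|⟨a,_|⟨b,_|⟨c,r⟩⟩⟩ <;> simp [pvAInMap, pvAKeys] <;> aesop

-- -- pvDigitAt on a suffix that starts with a spelled word --
lemma pvD_one (t : List Char) : pvDigitAt ('o'::'n'::'e'::t) = some '1' := by
  simp [pvDigitAt, pvWordMap, PySem.Chars.startswith, PySem.Chars.isdigit, List.isPrefixOf]
lemma pvD_two (t : List Char) : pvDigitAt ('t'::'w'::'o'::t) = some '2' := by
  simp [pvDigitAt, pvWordMap, PySem.Chars.startswith, PySem.Chars.isdigit, List.isPrefixOf]
lemma pvD_three (t : List Char) : pvDigitAt ('t'::'h'::'r'::'e'::'e'::t) = some '3' := by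
  simp [pvDigitAt, pvWordMap, PySem.Chars.startswith, PySem.Chars.isdigit, List.isPrefixOf]
lemma pvD_four (t : List Char) : pvDigitAt ('f'::'o'::'u'::'r'::t) = some '4' := by
  simp [pvDigitAt, pvWordMap, PySem.Chars.startswith, PySem.Chars.isdigit, List.isPrefixOf]
lemma pvD_five (t : List Char) : pvDigitAt ('f'::'i'::'v'::'e'::t) = some '5' := by
  simp [pvDigitAt, pvWordMap, PySem.Chars.startswith, PySem.Chars.isdigit, List.isPrefixOf]
lemma pvD_six (t : List Char) : pvDigitAt ('s'::'i'::'x'::t) = some '6' := by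
  simp [pvDigitAt, pvWordMap, PySem.Chars.startswith, PySem.Chars.isdigit, List.isPrefixOf]
lemma pvD_seven (t : List Char) : pvDigitAt ('s'::'e'::'v'::'e'::'n'::t) = some '7' := by
  simp [pvDigitAt, pvWordMap, PySem.Chars.startswith, PySem.Chars.isdigit, List.isPrefixOf]
lemma pvD_eight (t : List Char) : pvDigitAt ('e'::'i'::'g'::'h'::'t'::t) = some '8' := by
  simp [pvDigitAt, pvWordMap, PySem.Chars.startswith, PySem.Chars.isdigit, List.isPrefixOf]
lemma pvD_nine (t : List Char) : pvDigitAt ('n'::'i'::'n'::'e'::t) = some '9' := by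
  simp [pvDigitAt, pvWordMap, PySem.Chars.startswith, PySem.Chars.isdigit, List.isPrefixOf]
lemma pvD_digit (c : Char) (rest : List Char) (h : PySem.Chars.isdigit c = true) :
    pvDigitAt (c :: rest) = some c := by simp [pvDigitAt, h]

-- -- pvDigitAt = none on every position A's loop skips over after a word match --
lemma pvS_ne (t : List Char) : pvDigitAt ('n'::'e'::t) = none := by
  simp [pvDigitAt, pvWordMap, PySem.Chars.startswith, PySem.Chars.isdigit, List.isPrefixOf]
lemma pvS_wo (t : List Char) : pvDigitAt ('w'::'o'::t) = none := by
  simp [pvDigitAt, pvWordMap, PySem.Chars.startswith, PySem.Chars.isdigit, List.isPrefixOf]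
lemma pvS_hreet (t : List Char) : pvDigitAt ('h'::'r'::'e'::'e'::t) = none := by
  simp [pvDigitAt, pvWordMap, PySem.Chars.startswith, PySem.Chars.isdigit, List.isPrefixOf]
lemma pvS_reet (t : List Char) : pvDigitAt ('r'::'e'::'e'::t) = none := by
  simp [pvDigitAt, pvWordMap, PySem.Chars.startswith, PySem.Chars.isdigit, List.isPrefixOf]
lemma pvS_ee (t : List Char) : pvDigitAt ('e'::'e'::t) = none := by
  simp [pvDigitAt, pvWordMap, PySem.Chars.startswith, PySem.Chars.isdigit, List.isPrefixOf]
lemma pvS_ur (t : List Char) : pvDigitAt ('o'::'u'::'r'::t) = none := by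
  simp [pvDigitAt, pvWordMap, PySem.Chars.startswith, PySem.Chars.isdigit, List.isPrefixOf]
lemma pvS_ur2 (t : List Char) : pvDigitAt ('u'::'r'::t) = none := by
  simp [pvDigitAt, pvWordMap, PySem.Chars.startswith, PySem.Chars.isdigit, List.isPrefixOf]
lemma pvS_ive (t : List Char) : pvDigitAt ('i'::'v'::'e'::t) = none := by
  simp [pvDigitAt, pvWordMap, PySem.Chars.startswith, PySem.Chars.isdigit, List.isPrefixOf]
lemma pvS_ve (t : List Char) : pvDigitAt ('v'::'e'::t) = none := by
  simp [pvDigitAt, pvWordMap, PySem.Chars.startswith, PySem.Chars.isdigit, List.isPrefixOf]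
lemma pvS_ix (t : List Char) : pvDigitAt ('i'::'x'::t) = none := by
  simp [pvDigitAt, pvWordMap, PySem.Chars.startswith, PySem.Chars.isdigit, List.isPrefixOf]
lemma pvS_even (t : List Char) : pvDigitAt ('e'::'v'::'e'::'n'::t) = none := by
  simp [pvDigitAt, pvWordMap, PySem.Chars.startswith, PySem.Chars.isdigit, List.isPrefixOf]
lemma pvS_ven (t : List Char) : pvDigitAt ('v'::'e'::'n'::t) = none := by
  simp [pvDigitAt, pvWordMap, PySem.Chars.startswith, PySem.Chars.isdigit, List.isPrefixOf]
lemma pvS_en (t : List Char) : pvDigitAt ('e'::'n'::t) = none := by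
  simp [pvDigitAt, pvWordMap, PySem.Chars.startswith, PySem.Chars.isdigit, List.isPrefixOf]
lemma pvS_ight (t : List Char) : pvDigitAt ('i'::'g'::'h'::'t'::t) = none := by
  simp [pvDigitAt, pvWordMap, PySem.Chars.startswith, PySem.Chars.isdigit, List.isPrefixOf]
lemma pvS_ght (t : List Char) : pvDigitAt ('g'::'h'::'t'::t) = none := by
  simp [pvDigitAt, pvWordMap, PySem.Chars.startswith, PySem.Chars.isdigit, List.isPrefixOf]
lemma pvS_ht (t : List Char) : pvDigitAt ('h'::'t'::t) = none := by
  simp [pvDigitAt, pvWordMap, PySem.Chars.startswith, PySem.Chars.isdigit, List.isPrefixOf]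
lemma pvS_ine (t : List Char) : pvDigitAt ('i'::'n'::'e'::t) = none := by
  simp [pvDigitAt, pvWordMap, PySem.Chars.startswith, PySem.Chars.isdigit, List.isPrefixOf]

-- -- pvDigitAt = none when A's branch tests all fail --
lemma pvN_o (rest : List Char) (h : pvAInMap (('o'::rest).take 3) = false) :
    pvDigitAt ('o'::rest) = none := by
  rcases rest with _|⟨a,_|⟨b,r⟩⟩ <;>
    simp [pvAInMap, pvAKeys] at h <;>
    simp [pvDigitAt, pvWordMap, PySem.Chars.startswith, PySem.Chars.isdigit, List.isPrefixOf] <;>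
    aesop
lemma pvN_t (rest : List Char) (h3 : pvAInMap (('t'::rest).take 3) = false)
    (h5 : pvAInMap (('t'::rest).take 5) = false) : pvDigitAt ('t'::rest) = none := by
  rcases rest with _|⟨a,_|⟨b,_|⟨c,_|⟨d,r⟩⟩⟩⟩ <;>
    simp [pvAInMap, pvAKeys] at h3 h5 <;>
    simp [pvDigitAt, pvWordMap, PySem.Chars.startswith, PySem.Chars.isdigit, List.isPrefixOf] <;>
    aesop
lemma pvN_f (rest : List Char) (h : pvAInMap (('f'::rest).take 4) = false) :
    pvDigitAt ('f'::rest) = none := by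
  rcases rest with _|⟨a,_|⟨b,_|⟨c,r⟩⟩⟩ <;>
    simp [pvAInMap, pvAKeys] at h <;>
    simp [pvDigitAt, pvWordMap, PySem.Chars.startswith, PySem.Chars.isdigit, List.isPrefixOf] <;>
    aesop
lemma pvN_s (rest : List Char) (h3 : pvAInMap (('s'::rest).take 3) = false)
    (h5 : pvAInMap (('s'::rest).take 5) = false) : pvDigitAt ('s'::rest) = none := by
  rcases rest with _|⟨a,_|⟨b,_|⟨c,_|⟨d,r⟩⟩⟩⟩ <;>
    simp [pvAInMap, pvAKeys] at h3 h5 <;>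
    simp [pvDigitAt, pvWordMap, PySem.Chars.startswith, PySem.Chars.isdigit, List.isPrefixOf] <;>
    aesop
lemma pvN_e (rest : List Char) (h : pvAInMap (('e'::rest).take 5) = false) :
    pvDigitAt ('e'::rest) = none := by
  rcases rest with _|⟨a,_|⟨b,_|⟨c,_|⟨d,r⟩⟩⟩⟩ <;>
    simp [pvAInMap, pvAKeys] at h <;>
    simp [pvDigitAt, pvWordMap, PySem.Chars.startswith, PySem.Chars.isdigit, List.isPrefixOf] <;>
    aesop
lemma pvN_n (rest : List Char) (h : pvAInMap (('n'::rest).take 4) = false) :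
    pvDigitAt ('n'::rest) = none := by
  rcases rest with _|⟨a,_|⟨b,_|⟨c,r⟩⟩⟩ <;>
    simp [pvAInMap, pvAKeys] at h <;>
    simp [pvDigitAt, pvWordMap, PySem.Chars.startswith, PySem.Chars.isdigit, List.isPrefixOf] <;>
    aesop
lemma pvN_other (c : Char) (rest : List Char)
    (hL : ¬(c = 'o' ∨ c = 't' ∨ c = 'f' ∨ c = 's' ∨ c = 'e' ∨ c = 'n'))
    (hd : PySem.Chars.isdigit c = false) : pvDigitAt (c :: rest) = none := by
  push_neg at hL
  obtain ⟨h1, h2, h3, h4, h5, h6⟩ := hL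
  simp [pvDigitAt, pvWordMap, PySem.Chars.startswith, List.isPrefixOf, hd,
    h1, h2, h3, h4, h5, h6, Ne.symm]

lemma pvMainAux : ∀ (n : Nat) (u : List Char), u.length ≤ n →
    (pvAScan u).head? = (pvToks u).head? ∧ (pvAScan u).getLast? = (pvToks u).getLast? := by
  intro n
  induction n with
  | zero =>
    intro u hu
    have h : u = [] := List.eq_nil_of_length_eq_zero (Nat.le_zero.mp hu)
    subst h; exact ⟨by simp [pvAScan, pvToks], by simp [pvAScan, pvToks]⟩
  | succ n ih =>
    intro u hu
    rcases u with _ | ⟨c, rest⟩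
    · exact ⟨by simp [pvAScan, pvToks], by simp [pvAScan, pvToks]⟩
    have hr : rest.length ≤ n := by simp at hu; omega
    by_cases hL : c = 'o' ∨ c = 't' ∨ c = 'f' ∨ c = 's' ∨ c = 'e' ∨ c = 'n'
    · rcases hL with rfl | rfl | rfl | rfl | rfl | rfl
      · -- c = 'o'
        cases h3 : pvAInMap (('o'::rest).take 3) with
        | true =>
          obtain ⟨t, rfl⟩ := (pvIn_o3 rest).mp h3
          simp at h3
          have hA : pvAScan ('o'::'n'::'e'::t) = '1' :: pvAScan ('e'::t) := by
            simp [pvAScan, h3]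
          have hT : pvToks ('o'::'n'::'e'::t) = '1' :: pvToks ('e'::t) := by
            simp [pvToks, pvD_one, pvS_ne]
          have hIH := ih ('e'::t) (by simp at hr ⊢; omega)
          rw [hA, hT]
          exact ⟨by simp, pv_cons_getLast _ hIH.2⟩
        | false =>
          have hT : pvToks ('o'::rest) = pvToks rest := by simp [pvToks, pvN_o rest h3]
          simp at h3
          have hA : pvAScan ('o'::rest) = pvAScan rest := by simp [pvAScan, h3]
          rw [hA, hT]; exact ih rest hr
      · -- c = 't'
        cases h3 : pvAInMap (('t'::rest).take 3) with
        | true =>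
          obtain ⟨t, rfl⟩ := (pvIn_t3 rest).mp h3
          simp at h3
          have hA : pvAScan ('t'::'w'::'o'::t) = '2' :: pvAScan ('o'::t) := by
            simp [pvAScan, h3]
          have hT : pvToks ('t'::'w'::'o'::t) = '2' :: pvToks ('o'::t) := by
            simp [pvToks, pvD_two, pvS_wo]
          have hIH := ih ('o'::t) (by simp at hr ⊢; omega)
          rw [hA, hT]
          exact ⟨by simp, pv_cons_getLast _ hIH.2⟩
        | false =>
          cases h5 : pvAInMap (('t'::rest).take 5) with
          | true =>
            rcases (pvIn_t5 rest).mp h5 with ⟨t, rfl⟩ | rfl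
            · simp at h3 h5
              have hA : pvAScan ('t'::'h'::'r'::'e'::'e'::t) = '3' :: pvAScan ('e'::t) := by
                simp [pvAScan, h3, h5]
              have hT : pvToks ('t'::'h'::'r'::'e'::'e'::t) = '3' :: pvToks ('e'::t) := by
                simp [pvToks, pvD_three, pvS_hreet, pvS_reet, pvS_ee]
              have hIH := ih ('e'::t) (by simp at hr ⊢; omega)
              rw [hA, hT]
              exact ⟨by simp, pv_cons_getLast _ hIH.2⟩
            · have := (pvIn_t3 ['w','o']).mpr ⟨[], rfl⟩
              rw [this] at h3; cases h3
          | false =>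
            have hT : pvToks ('t'::rest) = pvToks rest := by simp [pvToks, pvN_t rest h3 h5]
            simp at h3 h5
            have hA : pvAScan ('t'::rest) = pvAScan rest := by simp [pvAScan, h3, h5]
            rw [hA, hT]; exact ih rest hr
      · -- c = 'f'
        cases h4 : pvAInMap (('f'::rest).take 4) with
        | true =>
          rcases (pvIn_f4 rest).mp h4 with ⟨t, rfl⟩ | ⟨t, rfl⟩
          · simp at h4
            have hA : pvAScan ('f'::'o'::'u'::'r'::t) = '4' :: pvAScan ('r'::t) := by
              simp [pvAScan, h4]
            have hT : pvToks ('f'::'o'::'u'::'r'::t) = '4' :: pvToks ('r'::t) := by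
              simp [pvToks, pvD_four, pvS_ur, pvS_ur2]
            have hIH := ih ('r'::t) (by simp at hr ⊢; omega)
            rw [hA, hT]
            exact ⟨by simp, pv_cons_getLast _ hIH.2⟩
          · simp at h4
            have hA : pvAScan ('f'::'i'::'v'::'e'::t) = '5' :: pvAScan ('e'::t) := by
              simp [pvAScan, h4]
            have hT : pvToks ('f'::'i'::'v'::'e'::t) = '5' :: pvToks ('e'::t) := by
              simp [pvToks, pvD_five, pvS_ive, pvS_ve]
            have hIH := ih ('e'::t) (by simp at hr ⊢; omega)
            rw [hA, hT]
            exact ⟨by simp, pv_cons_getLast _ hIH.2⟩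
        | false =>
          have hT : pvToks ('f'::rest) = pvToks rest := by simp [pvToks, pvN_f rest h4]
          simp at h4
          have hA : pvAScan ('f'::rest) = pvAScan rest := by simp [pvAScan, h4]
          rw [hA, hT]; exact ih rest hr
      · -- c = 's'
        cases h3 : pvAInMap (('s'::rest).take 3) with
        | true =>
          obtain ⟨t, rfl⟩ := (pvIn_s3 rest).mp h3
          simp at h3
          have hA : pvAScan ('s'::'i'::'x'::t) = '6' :: pvAScan ('x'::t) := by
            simp [pvAScan, h3]
          have hT : pvToks ('s'::'i'::'x'::t) = '6' :: pvToks ('x'::t) := by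
            simp [pvToks, pvD_six, pvS_ix]
          have hIH := ih ('x'::t) (by simp at hr ⊢; omega)
          rw [hA, hT]
          exact ⟨by simp, pv_cons_getLast _ hIH.2⟩
        | false =>
          cases h5 : pvAInMap (('s'::rest).take 5) with
          | true =>
            rcases (pvIn_s5 rest).mp h5 with ⟨t, rfl⟩ | rfl
            · simp at h3 h5
              have hA : pvAScan ('s'::'e'::'v'::'e'::'n'::t) = '7' :: pvAScan ('n'::t) := by
                simp [pvAScan, h3, h5]
              have hT : pvToks ('s'::'e'::'v'::'e'::'n'::t) = '7' :: pvToks ('n'::t) := by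
                simp [pvToks, pvD_seven, pvS_even, pvS_ven, pvS_en]
              have hIH := ih ('n'::t) (by simp at hr ⊢; omega)
              rw [hA, hT]
              exact ⟨by simp, pv_cons_getLast _ hIH.2⟩
            · have := (pvIn_s3 ['i','x']).mpr ⟨[], rfl⟩
              rw [this] at h3; cases h3
          | false =>
            have hT : pvToks ('s'::rest) = pvToks rest := by simp [pvToks, pvN_s rest h3 h5]
            simp at h3 h5
            have hA : pvAScan ('s'::rest) = pvAScan rest := by simp [pvAScan, h3, h5]
            rw [hA, hT]; exact ih rest hr
      · -- c = 'e'
        cases h5 : pvAInMap (('e'::rest).take 5) with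
        | true =>
          obtain ⟨t, rfl⟩ := (pvIn_e5 rest).mp h5
          simp at h5
          have hA : pvAScan ('e'::'i'::'g'::'h'::'t'::t) = '8' :: pvAScan ('t'::t) := by
            simp [pvAScan, h5]
          have hT : pvToks ('e'::'i'::'g'::'h'::'t'::t) = '8' :: pvToks ('t'::t) := by
            simp [pvToks, pvD_eight, pvS_ight, pvS_ght, pvS_ht]
          have hIH := ih ('t'::t) (by simp at hr ⊢; omega)
          rw [hA, hT]
          exact ⟨by simp, pv_cons_getLast _ hIH.2⟩
        | false =>
          have hT : pvToks ('e'::rest) = pvToks rest := by simp [pvToks, pvN_e rest h5]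
          simp at h5
          have hA : pvAScan ('e'::rest) = pvAScan rest := by simp [pvAScan, h5]
          rw [hA, hT]; exact ih rest hr
      · -- c = 'n'
        cases h4 : pvAInMap (('n'::rest).take 4) with
        | true =>
          obtain ⟨t, rfl⟩ := (pvIn_n4 rest).mp h4
          simp at h4
          have hA : pvAScan ('n'::'i'::'n'::'e'::t) = '9' :: pvAScan ('e'::t) := by
            simp [pvAScan, h4]
          have hT : pvToks ('n'::'i'::'n'::'e'::t) = '9' :: pvToks ('e'::t) := by
            simp [pvToks, pvD_nine, pvS_ine, pvS_ne]
          have hIH := ih ('e'::t) (by simp at hr ⊢; omega)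
          rw [hA, hT]
          exact ⟨by simp, pv_cons_getLast _ hIH.2⟩
        | false =>
          have hT : pvToks ('n'::rest) = pvToks rest := by simp [pvToks, pvN_n rest h4]
          simp at h4
          have hA : pvAScan ('n'::rest) = pvAScan rest := by simp [pvAScan, h4]
          rw [hA, hT]; exact ih rest hr
    · cases hdig : PySem.Chars.isdigit c with
      | true =>
        have hA : pvAScan (c :: rest) = c :: pvAScan rest := by simp [pvAScan, hL, hdig]
        have hT : pvToks (c :: rest) = c :: pvToks rest := by
          simp [pvToks, pvD_digit c rest hdig]
        have hIH := ih rest hr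
        rw [hA, hT]
        exact ⟨by simp, pv_cons_getLast _ hIH.2⟩
      | false =>
        have hA : pvAScan (c :: rest) = pvAScan rest := by simp [pvAScan, hL, hdig]
        have hT : pvToks (c :: rest) = pvToks rest := by
          simp [pvToks, pvN_other c rest hL hdig]
        rw [hA, hT]; exact ih rest hr

lemma pvMain (u : List Char) :
    (pvAScan u).head? = (pvToks u).head? ∧ (pvAScan u).getLast? = (pvToks u).getLast? :=
  pvMainAux u.length u le_rfl

lemma pvTest_eq (c : Char) (rest : List Char) :
    (PySem.Chars.isdigit c || pvPreWords.any (fun w => w.toList.isPrefixOf (c :: rest))) =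
      (pvDigitAt (c :: rest)).isSome := by
  cases hdig : PySem.Chars.isdigit c
  · simp [pvDigitAt, hdig, Option.isSome_map, List.isSome_find?, pvPreWords, pvWordMap,
      PySem.Chars.startswith]
  · simp [pvDigitAt, hdig]

lemma pvHasTok_iff (u : List Char) : pvHasTok u = true ↔ pvToks u ≠ [] := by
  induction u with
  | nil => simp [pvHasTok, pvToks]
  | cons c rest ih =>
    rw [pvHasTok, pvToks, pvTest_eq c rest]
    cases pvDigitAt (c :: rest) <;> simp [ih]

-- ===== VERDICT (by name: the statement is the Claim_ definition above) =====
lemma pv_getLast_index {ds : List Char} {b : Char} (hb : ds.getLast? = some b) :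
    PySem.List.pyGet? ds ((ds.length : Int) - 1) = some b := by
  have hne : ds ≠ [] := by rintro rfl; simp at hb
  have hlen : 1 ≤ ds.length := List.length_pos_iff.mpr hne
  have : ((ds.length : Int) - 1) = ((ds.length - 1 : Nat) : Int) := by omega
  rw [this, PySem.List.pyGet?_natCast, ← List.getLast?_eq_getElem?, hb]

theorem find_calibration_value_spec : Claim_equal_find_calibration_value := by
  intro s _ hpre
  unfold Spec_find_calibration_value
  simp only [find_calibration_value, find_calibration_value_alt]
  have hne : pvToks s.toList ≠ [] := (pvHasTok_iff s.toList).mp hpre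
  obtain ⟨a, ha⟩ : ∃ a, (pvToks s.toList).head? = some a := by
    cases h : pvToks s.toList with
    | nil => exact absurd h hne
    | cons x xs => exact ⟨x, by simp [h]⟩
  obtain ⟨b, hb⟩ : ∃ b, (pvToks s.toList).getLast? = some b := by
    cases h : (pvToks s.toList).getLast? with
    | none => exact absurd (List.getLast?_eq_none_iff.mp h) hne
    | some x => exact ⟨x, rfl⟩
  have hm := pvMain s.toList
  have h0 : PySem.List.pyGet? (pvAScan s.toList) 0 = some a := by
    rw [PySem.List.pyGet?_zero, ← List.head?_eq_getElem?, hm.1, ha]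
  have h1 : PySem.List.pyGet? (pvAScan s.toList) (((pvAScan s.toList).length : Int) - 1) = some b :=
    pv_getLast_index (hm.2.trans hb)
  rw [h0, h1, pvFirstScan_eq_head s.toList, pvLastScan_eq_getLast s.toList, ha, hb]
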